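-- pv_equiv track=rewrite | github.com/moongS00/Part3_chap4 | Part3_chap4/41.py | findMinNum
-- ===== SOURCE A (Python) =====
-- def findMinNum(ns):
--     mn = ns[0]
--     cnt = 0
--
--     for i in ns:
--         if i < mn:
--             mn = i
--
--     for i in ns:
--         if i == mn:
--             cnt += 1
--
--     return mn, cnt
-- ===== SOURCE B (Python) =====
-- def findMinNum(ns):
--     mn = ns[0]
--     cnt = 0
--     for i in ns:
--         if i < mn:
--             mn = i
--             cnt = 1
--         elif i == mn:
--             cnt += 1
--     return mn, cnt
-- ===== Notes on version B (the rewrite author's own statement) =====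
-- stated objective: alternative
-- what changed: Single pass maintaining (min, count) with a count reset on each new minimum, instead of two separate scans (one for the minimum, one to count it).
import Mathlib
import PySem

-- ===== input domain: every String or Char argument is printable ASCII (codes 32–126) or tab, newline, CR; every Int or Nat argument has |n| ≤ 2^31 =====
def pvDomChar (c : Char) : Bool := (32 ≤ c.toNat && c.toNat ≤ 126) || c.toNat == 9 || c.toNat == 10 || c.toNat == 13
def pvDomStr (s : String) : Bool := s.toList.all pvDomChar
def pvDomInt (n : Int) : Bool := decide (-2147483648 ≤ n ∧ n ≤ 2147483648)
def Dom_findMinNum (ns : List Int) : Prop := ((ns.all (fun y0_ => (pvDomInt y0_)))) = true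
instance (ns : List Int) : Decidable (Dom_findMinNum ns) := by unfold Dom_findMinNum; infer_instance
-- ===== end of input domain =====

-- B replaces A's two scans (find min, then count it) by one pass keeping (min, count) with a count reset at each new minimum; same O(n) cost, alternative decomposition.

-- ===== PORT A =====
def findMinNum (ns : List Int) : Int × Int :=
  match ns with
  | [] => (0, 0)  -- Python raises IndexError on the empty list; excluded by Pre_findMinNum
  | n0 :: _ =>
    let mn := ns.foldl (fun mn i => if i < mn then i else mn) n0
    let cnt := ns.foldl (fun cnt i => if i = mn then cnt + 1 else cnt) (0 : Int)
    (mn, cnt)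

-- ===== PORT B =====
def findMinNum_alt (ns : List Int) : Int × Int :=
  match ns with
  | [] => (0, 0)  -- Python raises IndexError on the empty list; excluded by Pre_findMinNum
  | n0 :: _ =>
    ns.foldl (fun (s : Int × Int) i =>
      if i < s.1 then (i, 1) else if i = s.1 then (s.1, s.2 + 1) else s) (n0, 0)

-- ===== PRECONDITION & SPEC =====
-- Pre_ excludes only the empty list, on which Python A raises IndexError at the first-element access.
def Pre_findMinNum (ns : List Int) : Prop := ns ≠ []
instance (ns : List Int) : Decidable (Pre_findMinNum ns) := by unfold Pre_findMinNum; infer_instance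
def pvWitness_findMinNum : List Int := [3, 1, 2, 1]

def Spec_findMinNum (ns : List Int) (out : Int × Int) : Prop := out = findMinNum_alt ns
instance (ns : List Int) (out : Int × Int) : Decidable (Spec_findMinNum ns out) := by unfold Spec_findMinNum; infer_instance

-- ===== CLAIM (what is proved, stated in full; the proofs are below) =====
def Claim_equal_findMinNum : Prop := ∀ (ns : List Int), Dom_findMinNum ns → Pre_findMinNum ns → Spec_findMinNum ns (findMinNum ns)

-- ===== LEMMAS AND PROOFS =====

-- A's first loop body is `min`.
theorem pv_foldA_min (l : List Int) (m : Int) :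
    l.foldl (fun mn i => if i < mn then i else mn) m = l.foldl min m := by
  induction l generalizing m with
  | nil => rfl
  | cons x t ih =>
    simp only [List.foldl_cons, ih]
    congr 1
    by_cases h : x < m <;> simp [min_def, h] <;> omega

-- A's second loop counts occurrences.
theorem pv_foldA_count (l : List Int) (m c : Int) :
    l.foldl (fun cnt i => if i = m then cnt + 1 else cnt) c = c + (l.count m : Int) := by
  induction l generalizing c with
  | nil => simp
  | cons x t ih =>
    by_cases h : x = m <;>
      simp [List.count_cons, h, ih] <;> push_cast <;> ring

theorem pv_foldlMin_le (l : List Int) (m : Int) : l.foldl min m ≤ m := by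
  induction l generalizing m with
  | nil => simp
  | cons x t ih => exact le_trans (ih (min m x)) (min_le_left _ _)

-- Characterisation of B's single pass.
theorem pv_foldB (l : List Int) (m c : Int) :
    l.foldl (fun (s : Int × Int) i =>
      if i < s.1 then (i, 1) else if i = s.1 then (s.1, s.2 + 1) else s) (m, c)
    = (l.foldl min m,
       if l.foldl min m = m then c + (l.count m : Int) else (l.count (l.foldl min m) : Int)) := by
  induction l generalizing m c with
  | nil => simp
  | cons x t ih =>
    simp only [List.foldl_cons]
    by_cases hx : x < m
    · have hmin : min m x = x := by omega
      have hle := pv_foldlMin_le t x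
      rw [if_pos hx, ih, hmin]
      have hne : t.foldl min x ≠ m := by omega
      rw [if_neg hne]
      by_cases hfx : t.foldl min x = x
      · simp [hfx]; omega
      · simp [List.count_cons, hfx]
        omega
    · have hmin : min m x = m := by omega
      have hle := pv_foldlMin_le t m
      rw [if_neg hx]
      by_cases he : x = m
      · rw [if_pos (by simpa using he), ih, hmin]
        by_cases hf : t.foldl min m = m
        · simp [hf, List.count_cons, he]
          push_cast; ring
        · simp [hf, List.count_cons]
          omega
      · rw [if_neg (by simpa using he), ih, hmin]
        by_cases hf : t.foldl min m = m
        · simp [hf, List.count_cons]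
          omega
        · simp [hf, List.count_cons]
          omega

-- ===== VERDICT (by name: the statement is the Claim_ definition above) =====
theorem findMinNum_spec : Claim_equal_findMinNum := by
  intro ns _ hpre
  unfold Spec_findMinNum findMinNum findMinNum_alt
  match ns with
  | [] => exact absurd rfl hpre
  | n0 :: t =>
    simp only [pv_foldA_min, pv_foldA_count, pv_foldB]
    have h0 : min n0 n0 = n0 := min_self n0
    simp only [List.foldl_cons, h0]
    by_cases hf : t.foldl min n0 = n0 <;> simp [hf, List.count_cons]
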